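-- pv_equiv track=rewrite | github.com/RBVI/ChimeraX | src/bundles/map_data/src/imagestack/ome_tiff.py | missing_planes
-- ===== SOURCE A (Python) =====
-- def missing_planes(ptable, nc, nt, nz):
--     missing = []
--     for c in range(nc):
--         for t in range(nt):
--             for z in range(nz):
--                 if (c,t,z) not in ptable:
--                     missing.append((c,t,z))
--     missing.sort()
--     return missing
-- ===== SOURCE B (Python) =====
-- def missing_planes(ptable, nc, nt, nz):
--     present = sorted({(c, t, z) for (c, t, z) in ptable
--                       if 0 <= c < nc and 0 <= t < nt and 0 <= z < nz})
--     n = len(present)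
--     missing = []
--     j = 0
--     for c in range(nc):
--         for t in range(nt):
--             for z in range(nz):
--                 if j < n and present[j] == (c, t, z):
--                     j += 1
--                 else:
--                     missing.append((c, t, z))
--     return missing
-- ===== Notes on version B (the rewrite author's own statement) =====
-- stated objective: faster
-- what changed: replaces the per-coordinate 'not in ptable' list scans and the final sort by sorting the in-range present coordinates once and merge-walking the coordinate box in lexicographic order with a single pointer
import Mathlib
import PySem

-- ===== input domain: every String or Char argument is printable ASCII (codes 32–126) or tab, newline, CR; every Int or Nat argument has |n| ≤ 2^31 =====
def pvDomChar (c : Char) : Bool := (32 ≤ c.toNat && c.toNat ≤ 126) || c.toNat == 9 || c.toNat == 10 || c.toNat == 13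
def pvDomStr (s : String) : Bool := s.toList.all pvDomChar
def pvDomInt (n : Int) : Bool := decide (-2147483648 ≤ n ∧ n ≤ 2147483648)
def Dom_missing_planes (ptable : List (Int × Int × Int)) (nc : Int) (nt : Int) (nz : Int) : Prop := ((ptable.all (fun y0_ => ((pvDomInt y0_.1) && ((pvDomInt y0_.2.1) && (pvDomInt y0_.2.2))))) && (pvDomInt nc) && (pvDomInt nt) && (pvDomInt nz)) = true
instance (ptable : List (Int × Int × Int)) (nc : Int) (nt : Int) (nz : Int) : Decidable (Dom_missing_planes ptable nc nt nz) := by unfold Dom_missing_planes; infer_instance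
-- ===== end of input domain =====

-- B sorts the in-range present coordinates once and merge-walks the coordinate box in
-- lexicographic order with one pointer, instead of A's per-coordinate list-membership
-- scans followed by a sort.

-- ===== PORT A =====
-- Python's list.sort() on these int triples: every element lies in [0,nc)×[0,nt)×[0,nz),
-- where the integer key (c*nt+t)*nz+z induces exactly Python's lexicographic tuple order
-- (exact here); PySem.List.sorted is Python's stable sort.
def missing_planes (ptable : List (Int × Int × Int)) (nc : Int) (nt : Int) (nz : Int) : List (Int × Int × Int) :=
  let missing :=
    (PySem.List.pyRange 0 nc 1).foldl (fun acc c =>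
      (PySem.List.pyRange 0 nt 1).foldl (fun acc t =>
        (PySem.List.pyRange 0 nz 1).foldl (fun acc z =>
          if (c, t, z) ∉ ptable then acc ++ [(c, t, z)] else acc) acc) acc) []
  PySem.List.sorted missing (fun p => (p.1 * nt + p.2.1) * nz + p.2.2) false

-- ===== PORT B =====
-- sorted({...}) over in-range int triples, ported with the same lexicographic integer
-- key as above (exact on these in-range triples); the nested loops then walk the box in
-- lexicographic order with pointer j into the sorted present list, as Source B does.
def missing_planes_alt (ptable : List (Int × Int × Int)) (nc : Int) (nt : Int) (nz : Int) : List (Int × Int × Int) :=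
  let present := PySem.List.sorted
    (PySem.Set.ofList (ptable.filter (fun p =>
      decide (0 ≤ p.1) && decide (p.1 < nc) && decide (0 ≤ p.2.1) && decide (p.2.1 < nt) &&
      decide (0 ≤ p.2.2) && decide (p.2.2 < nz))))
    (fun p => (p.1 * nt + p.2.1) * nz + p.2.2) false
  let n := present.length
  let r :=
    (PySem.List.pyRange 0 nc 1).foldl (fun s c =>
      (PySem.List.pyRange 0 nt 1).foldl (fun s t =>
        (PySem.List.pyRange 0 nz 1).foldl (fun s z =>
          if s.2 < n ∧ present.getD s.2 (0, 0, 0) = (c, t, z)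
          then (s.1, s.2 + 1) else (s.1 ++ [(c, t, z)], s.2)) s) s)
      (([] : List (Int × Int × Int)), (0 : Nat))
  r.1

-- ===== PRECONDITION & SPEC =====
def Spec_missing_planes (ptable : List (Int × Int × Int)) (nc : Int) (nt : Int) (nz : Int) (out : List (Int × Int × Int)) : Prop := out = missing_planes_alt ptable nc nt nz
instance (ptable : List (Int × Int × Int)) (nc : Int) (nt : Int) (nz : Int) (out : List (Int × Int × Int)) : Decidable (Spec_missing_planes ptable nc nt nz out) := by unfold Spec_missing_planes; infer_instance

-- ===== CLAIM (what is proved, stated in full; the proofs are below) =====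
def Claim_equal_missing_planes : Prop := ∀ (ptable : List (Int × Int × Int)) (nc : Int) (nt : Int) (nz : Int), Dom_missing_planes ptable nc nt nz → Spec_missing_planes ptable nc nt nz (missing_planes ptable nc nt nz)

-- ===== LEMMAS AND PROOFS =====

def pvProduct (nc nt nz : Int) : List (Int × Int × Int) :=
  (PySem.List.pyRange 0 nc 1).flatMap (fun c =>
    (PySem.List.pyRange 0 nt 1).flatMap (fun t =>
      (PySem.List.pyRange 0 nz 1).map (fun z => (c, t, z))))

def pvRank (nt nz : Int) (p : Int × Int × Int) : Int := (p.1 * nt + p.2.1) * nz + p.2.2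

theorem pvProduct_nodup (nc nt nz : Int) : (pvProduct nc nt nz).Nodup := by
  unfold pvProduct
  rw [List.nodup_flatMap]
  refine ⟨?_, ?_⟩
  · intro c _
    rw [List.nodup_flatMap]
    refine ⟨?_, ?_⟩
    · intro t _
      exact (PySem.List.nodup_pyRange_one 0 nz).map (fun a b h => by simpa using h)
    · refine (PySem.List.pairwise_lt_pyRange_one 0 nt).imp ?_
      intro t1 t2 hlt x hx1 hx2
      simp only [List.mem_map] at hx1 hx2
      obtain ⟨z1, _, rfl⟩ := hx1
      obtain ⟨z2, _, he⟩ := hx2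
      simp only [Prod.mk.injEq] at he
      omega
  · refine (PySem.List.pairwise_lt_pyRange_one 0 nc).imp ?_
    intro c1 c2 hlt x hx1 hx2
    simp only [List.mem_flatMap, List.mem_map] at hx1 hx2
    obtain ⟨t1, _, z1, _, rfl⟩ := hx1
    obtain ⟨t2, _, z2, _, he⟩ := hx2
    simp only [Prod.mk.injEq] at he
    omega

theorem pvMem_product (nc nt nz : Int) (x : Int × Int × Int) :
    x ∈ pvProduct nc nt nz ↔
      (0 ≤ x.1 ∧ x.1 < nc) ∧ (0 ≤ x.2.1 ∧ x.2.1 < nt) ∧ (0 ≤ x.2.2 ∧ x.2.2 < nz) := by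
  obtain ⟨a, b, c⟩ := x
  simp only [pvProduct, List.mem_flatMap, List.mem_map, PySem.List.mem_pyRange_one,
    Prod.mk.injEq]
  constructor
  · rintro ⟨c1, hc1, t1, ht1, z1, hz1, rfl, rfl, rfl⟩
    exact ⟨hc1, ht1, hz1⟩
  · rintro ⟨hc1, ht1, hz1⟩
    exact ⟨a, hc1, b, ht1, c, hz1, rfl, rfl, rfl⟩

theorem pvPairwise_flatMap {α β : Type} (l : List α) (f : α → List β)
    (R : β → β → Prop)
    (h1 : ∀ x ∈ l, (f x).Pairwise R)
    (h2 : l.Pairwise (fun x y => ∀ a ∈ f x, ∀ b ∈ f y, R a b)) :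
    (l.flatMap f).Pairwise R := by
  induction l with
  | nil => simp
  | cons x xs ih =>
    rw [List.flatMap_cons, List.pairwise_append]
    refine ⟨h1 x (by simp), ih (fun y hy => h1 y (by simp [hy])) h2.of_cons, ?_⟩
    intro a ha b hb
    simp only [List.mem_flatMap] at hb
    obtain ⟨y, hy, hby⟩ := hb
    exact (List.pairwise_cons.mp h2).1 y hy a ha b hby

theorem pvPairwise_rank_product (nc nt nz : Int) :
    (pvProduct nc nt nz).Pairwise (fun a b => pvRank nt nz a < pvRank nt nz b) := by
  unfold pvProduct
  refine pvPairwise_flatMap _ _ _ ?_ ?_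
  · intro c _
    refine pvPairwise_flatMap _ _ _ ?_ ?_
    · intro t _
      rw [List.pairwise_map]
      refine (PySem.List.pairwise_lt_pyRange_one 0 nz).imp ?_
      intro z1 z2 h
      simp only [pvRank]
      omega
    · refine (PySem.List.pairwise_lt_pyRange_one 0 nt).imp ?_
      intro t1 t2 hlt a ha b hb
      simp only [List.mem_map, PySem.List.mem_pyRange_one] at ha hb
      obtain ⟨z1, hz1, rfl⟩ := ha
      obtain ⟨z2, hz2, rfl⟩ := hb
      simp only [pvRank]
      have h1 : (c * nt + t1 + 1) * nz ≤ (c * nt + t2) * nz :=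
        mul_le_mul_of_nonneg_right (by omega) (by omega)
      nlinarith
  · refine (PySem.List.pairwise_lt_pyRange_one 0 nc).imp ?_
    intro c1 c2 hlt a ha b hb
    simp only [List.mem_flatMap, List.mem_map, PySem.List.mem_pyRange_one] at ha hb
    obtain ⟨t1, ht1, z1, hz1, rfl⟩ := ha
    obtain ⟨t2, ht2, z2, hz2, rfl⟩ := hb
    simp only [pvRank]
    have h1 : (c1 * nt + t1 + 1) * nz ≤ (c1 * nt + nt) * nz :=
      mul_le_mul_of_nonneg_right (by omega) (by omega)
    have h2 : (c1 * nt + nt) * nz ≤ (c2 * nt + t2) * nz :=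
      mul_le_mul_of_nonneg_right (by nlinarith [mul_le_mul_of_nonneg_right (show c1 + 1 ≤ c2 by omega) (show (0:Int) ≤ nt by omega)]) (by omega)
    nlinarith

theorem inner_eq (ptable : List (Int × Int × Int)) (c t nz : Int)
    (acc : List (Int × Int × Int)) :
    (PySem.List.pyRange 0 nz 1).foldl (fun acc z =>
        if (c, t, z) ∉ ptable then acc ++ [(c, t, z)] else acc) acc
    = acc ++ ((PySem.List.pyRange 0 nz 1).filter
        (fun z => decide ((c, t, z) ∉ ptable))).map (fun z => (c, t, z)) := by
  rw [PySem.List.foldl_append_ite]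

theorem middle_eq (ptable : List (Int × Int × Int)) (c nt nz : Int)
    (acc : List (Int × Int × Int)) :
    (PySem.List.pyRange 0 nt 1).foldl (fun acc t =>
      (PySem.List.pyRange 0 nz 1).foldl (fun acc z =>
        if (c, t, z) ∉ ptable then acc ++ [(c, t, z)] else acc) acc) acc
    = acc ++ (PySem.List.pyRange 0 nt 1).flatMap (fun t =>
        ((PySem.List.pyRange 0 nz 1).filter
          (fun z => decide ((c, t, z) ∉ ptable))).map (fun z => (c, t, z))) := by
  have h : (fun (acc : List (Int × Int × Int)) t =>
      (PySem.List.pyRange 0 nz 1).foldl (fun acc z =>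
        if (c, t, z) ∉ ptable then acc ++ [(c, t, z)] else acc) acc)
    = (fun acc t => acc ++ ((PySem.List.pyRange 0 nz 1).filter
        (fun z => decide ((c, t, z) ∉ ptable))).map (fun z => (c, t, z))) := by
    funext a t
    exact inner_eq ptable c t nz a
  rw [h, PySem.List.foldl_append_eq_flatMap]

theorem loopA_eq_filter (ptable : List (Int × Int × Int)) (nc nt nz : Int) :
    (PySem.List.pyRange 0 nc 1).foldl (fun acc c =>
      (PySem.List.pyRange 0 nt 1).foldl (fun acc t =>
        (PySem.List.pyRange 0 nz 1).foldl (fun acc z =>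
          if (c, t, z) ∉ ptable then acc ++ [(c, t, z)] else acc) acc) acc) []
    = (pvProduct nc nt nz).filter (fun x => decide (x ∉ ptable)) := by
  have h : (fun (acc : List (Int × Int × Int)) c =>
      (PySem.List.pyRange 0 nt 1).foldl (fun acc t =>
        (PySem.List.pyRange 0 nz 1).foldl (fun acc z =>
          if (c, t, z) ∉ ptable then acc ++ [(c, t, z)] else acc) acc) acc)
    = (fun acc c => acc ++ (PySem.List.pyRange 0 nt 1).flatMap (fun t =>
        ((PySem.List.pyRange 0 nz 1).filter
          (fun z => decide ((c, t, z) ∉ ptable))).map (fun z => (c, t, z)))) := by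
    funext a c
    exact middle_eq ptable c nt nz a
  rw [h, PySem.List.foldl_append_eq_flatMap]
  unfold pvProduct
  simp only [List.nil_append, List.filter_flatMap, List.filter_map, Function.comp_def]

-- A's value: the loop output is already strictly rank-increasing, so the sort is the identity
theorem portA_eq_filter (ptable : List (Int × Int × Int)) (nc nt nz : Int) :
    missing_planes ptable nc nt nz
    = (pvProduct nc nt nz).filter (fun x => decide (x ∉ ptable)) := by
  show PySem.List.sorted _ _ false = _
  rw [loopA_eq_filter]
  exact PySem.List.sorted_eq_self_of_pairwise _ _
    (((pvPairwise_rank_product nc nt nz).filter _).imp (fun h => le_of_lt h))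

-- B's sorted present list is exactly the present coordinates in box-lexicographic order
theorem present_eq (ptable : List (Int × Int × Int)) (nc nt nz : Int) :
    PySem.List.sorted
      (PySem.Set.ofList (ptable.filter (fun p =>
        decide (0 ≤ p.1) && decide (p.1 < nc) && decide (0 ≤ p.2.1) && decide (p.2.1 < nt) &&
        decide (0 ≤ p.2.2) && decide (p.2.2 < nz))))
      (fun p => (p.1 * nt + p.2.1) * nz + p.2.2) false
    = (pvProduct nc nt nz).filter (fun x => decide (x ∈ ptable)) := by
  refine PySem.List.sorted_eq_of_perm_of_pairwise_lt _ _ _ ?_ ?_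
  · refine (List.perm_ext_iff_of_nodup ((pvProduct_nodup nc nt nz).filter _)
      (PySem.Set.nodup_ofList _)).2 ?_
    intro x
    rw [PySem.Set.mem_ofList]
    simp only [List.mem_filter, pvMem_product, Bool.and_eq_true, decide_eq_true_eq]
    tauto
  · exact (pvPairwise_rank_product nc nt nz).filter _

-- the merge walk with pointer j into pres drops exactly the elements of ptable
theorem pvWalk (ptable pres : List (Int × Int × Int))
    (hsub : ∀ x ∈ pres, x ∈ ptable) :
    ∀ (xs acc : List (Int × Int × Int)) (j : Nat),
    pres.drop j = xs.filter (fun x => decide (x ∈ ptable)) →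
    xs.foldl (fun s p =>
        if s.2 < pres.length ∧ pres.getD s.2 (0, 0, 0) = p
        then (s.1, s.2 + 1) else (s.1 ++ [p], s.2)) (acc, j)
    = (acc ++ xs.filter (fun x => decide (x ∉ ptable)),
       j + (xs.filter (fun x => decide (x ∈ ptable))).length) := by
  intro xs
  induction xs with
  | nil => intro acc j h; simp
  | cons x xs ih =>
    intro acc j h
    by_cases hx : x ∈ ptable
    · rw [List.filter_cons_of_pos (by simpa using hx)] at h
      have hj : j < pres.length := by
        by_contra hge
        rw [List.drop_eq_nil_of_le (by omega)] at h
        exact List.cons_ne_nil _ _ h.symm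
      rw [List.drop_eq_getElem_cons hj] at h
      obtain ⟨hhead, htail⟩ := List.cons.inj h
      rw [List.foldl_cons]
      rw [if_pos ⟨hj, by rw [List.getD_eq_getElem _ _ hj]; exact hhead⟩]
      rw [ih acc (j + 1) htail]
      rw [List.filter_cons_of_neg (by simpa using hx),
        List.filter_cons_of_pos (by simpa using hx)]
      simp only [List.length_cons, Prod.mk.injEq]
      exact ⟨by trivial, by omega⟩
    · rw [List.filter_cons_of_neg (by simpa using hx)] at h
      rw [List.foldl_cons]
      rw [if_neg ?_]
      · rw [ih (acc ++ [x]) j h]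
        rw [List.filter_cons_of_pos (by simpa using hx),
          List.filter_cons_of_neg (by simpa using hx)]
        simp
      · rintro ⟨hj, heq⟩
        rw [List.getD_eq_getElem _ _ hj] at heq
        exact hx (heq ▸ hsub _ (List.getElem_mem hj))

theorem pvFoldl_flatMap {α β σ : Type} (l : List α) (f : α → List β)
    (g : σ → β → σ) (init : σ) :
    (l.flatMap f).foldl g init = l.foldl (fun s x => (f x).foldl g s) init := by
  induction l generalizing init with
  | nil => simp
  | cons x xs ih => simp [List.flatMap_cons, List.foldl_append, ih]

-- B's nested loops are the single walk over the box in lexicographic order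
theorem loopB_eq_foldl_product (pres : List (Int × Int × Int)) (nc nt nz : Int)
    (s0 : List (Int × Int × Int) × Nat) :
    (PySem.List.pyRange 0 nc 1).foldl (fun s c =>
      (PySem.List.pyRange 0 nt 1).foldl (fun s t =>
        (PySem.List.pyRange 0 nz 1).foldl (fun s z =>
          if s.2 < pres.length ∧ pres.getD s.2 (0, 0, 0) = (c, t, z)
          then (s.1, s.2 + 1) else (s.1 ++ [(c, t, z)], s.2)) s) s) s0
    = (pvProduct nc nt nz).foldl (fun s p =>
        if s.2 < pres.length ∧ pres.getD s.2 (0, 0, 0) = p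
        then (s.1, s.2 + 1) else (s.1 ++ [p], s.2)) s0 := by
  unfold pvProduct
  rw [pvFoldl_flatMap]
  congr 1
  funext s c
  rw [pvFoldl_flatMap]
  congr 1
  funext s t
  rw [List.foldl_map]

-- ===== VERDICT (by name: the statement is the Claim_ definition above) =====
theorem missing_planes_spec : Claim_equal_missing_planes := by
  intro ptable nc nt nz _
  show missing_planes ptable nc nt nz = missing_planes_alt ptable nc nt nz
  rw [portA_eq_filter]
  show _ = (_ : List (Int × Int × Int) × Nat).1
  rw [loopB_eq_foldl_product, present_eq]
  rw [pvWalk ptable _ (fun x hx => by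
        simp only [List.mem_filter, decide_eq_true_eq] at hx
        exact hx.2) (pvProduct nc nt nz) [] 0 (by simp)]
  simp
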